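-- pv_equiv track=rewrite | github.com/Sonaion/bachelor-arbeit | Snippets/CodeSnippets/Source/quad_mul_iterative.py | function
-- ===== SOURCE A (Python) =====
-- def function(n):
--     array_data = []
--     for i in range(1, n + 1):
--         array_data.append(i ** 2)
--     result = 1
--     for value in array_data:
--         result *= value
--     return result
-- ===== SOURCE B (Python) =====
-- def function(n):
--     result = 1
--     k = n
--     while k > 0:
--         result = result * k * k
--         k -= 1
--     return result
-- ===== Notes on version B (the rewrite author's own statement) =====
-- stated objective: simpler
-- what changed: B replaces A's two staged passes (build a list of squares over an ascending range, then fold a product over it) with a single count-down while loop from n that multiplies k*k into an accumulator, using no list at all.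
import Mathlib
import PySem

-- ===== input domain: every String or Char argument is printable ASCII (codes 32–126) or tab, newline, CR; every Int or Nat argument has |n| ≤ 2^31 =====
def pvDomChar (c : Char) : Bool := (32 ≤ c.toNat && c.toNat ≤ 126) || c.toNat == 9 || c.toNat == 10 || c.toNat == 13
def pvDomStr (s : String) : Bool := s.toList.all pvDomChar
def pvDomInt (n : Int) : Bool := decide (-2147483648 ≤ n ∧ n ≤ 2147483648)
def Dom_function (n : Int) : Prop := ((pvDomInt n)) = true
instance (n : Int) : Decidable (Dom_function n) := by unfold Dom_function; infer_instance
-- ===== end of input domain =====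

-- B replaces A's two staged passes (list of squares, then a product fold) with one count-down loop from n, no list (simpler).

-- ===== PORT A =====
def function (n : Int) : Int :=
  let array_data : List Int :=
    (PySem.List.pyRange 1 (n + 1) 1).foldl (fun acc i => acc ++ [i ^ 2]) []
  array_data.foldl (fun result value => result * value) 1

-- ===== PORT B =====
def functionAltLoop (k result : Int) : Int :=
  if 0 < k then functionAltLoop (k - 1) (result * k * k)
  else result
termination_by k.toNat
decreasing_by omega

def function_alt (n : Int) : Int := functionAltLoop n 1

-- ===== PRECONDITION & SPEC =====
def Spec_function (n : Int) (out : Int) : Prop := out = function_alt n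
instance (n : Int) (out : Int) : Decidable (Spec_function n out) := by unfold Spec_function; infer_instance

-- ===== CLAIM (what is proved, stated in full; the proofs are below) =====
def Claim_equal_function : Prop := ∀ (n : Int), Dom_function n → Spec_function n (function n)

-- ===== LEMMAS AND PROOFS =====

theorem pv_foldl_append_sq (l : List Int) (acc : List Int) :
    l.foldl (fun a i => a ++ [i ^ 2]) acc = acc ++ l.map (fun i => i ^ 2) := by
  induction l generalizing acc with
  | nil => simp
  | cons x t ih => simp [List.foldl, ih]

theorem pv_function_eq_prod (n : Int) :
    function n = ((PySem.List.pyRange 1 (n + 1) 1).map (fun i => i ^ 2)).foldl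
      (fun a i => a * i) 1 := by
  unfold function
  simp only
  rw [pv_foldl_append_sq, List.nil_append]

theorem pv_function_base (n : Int) (h : n ≤ 0) : function n = 1 := by
  rw [pv_function_eq_prod, PySem.List.pyRange_one_eq_nil (by omega)]
  simp

theorem pv_function_succ (n : Int) (h : 0 < n) :
    function n = function (n - 1) * n * n := by
  rw [pv_function_eq_prod, pv_function_eq_prod]
  rw [PySem.List.pyRange_one_succ_right (by omega : (1:Int) ≤ n)]
  have : n - 1 + 1 = n := by ring
  rw [this, List.map_append, List.foldl_append]
  simp [List.foldl]
  ring

theorem pv_loop_eq (m : Nat) : ∀ (k r : Int), k.toNat = m →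
    functionAltLoop k r = r * function k := by
  induction m with
  | zero =>
      intro k r hm
      rw [functionAltLoop, if_neg (by omega : ¬ 0 < k), pv_function_base k (by omega)]
      ring
  | succ m ih =>
      intro k r hm
      rw [functionAltLoop, if_pos (by omega : 0 < k), ih (k - 1) _ (by omega),
        pv_function_succ k (by omega)]
      ring

-- ===== VERDICT (by name: the statement is the Claim_ definition above) =====
theorem function_spec : Claim_equal_function := by
  intro n _
  unfold Spec_function function_alt
  rw [pv_loop_eq n.toNat n 1 rfl, one_mul]
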